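-- pv_equiv track=rewrite | github.com/AymericFerreira/AdventOfCode | 2024/day2.py | check_if_jump_is_safe
-- ===== SOURCE A (Python) =====
-- def check_if_jump_is_safe(array: [int]) -> bool:
--     sorted_array = sorted(array, reverse=True)
--     for num1, num2 in zip(sorted_array, sorted_array[1:]):
--         if num1 - num2 > 3:
--             return False
--         if num1 == num2:
--             return False
--     return True
-- ===== SOURCE B (Python) =====
-- def check_if_jump_is_safe(array: [int]) -> bool:
--     if not array:
--         return True
--     values = set(array)
--     if len(values) != len(array):
--         return False
--     top = max(values)
--     return all(x + 1 in values or x + 2 in values or x + 3 in values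
--                for x in values if x != top)
-- ===== Notes on version B (the rewrite author's own statement) =====
-- stated objective: alternative
-- what changed: Replaces A's descending sort plus one interleaved adjacent-pair scan by a sort-free hash-set formulation: distinctness is checked by comparing set size with list length, and the gap condition by testing that every non-maximal value has x+1, x+2 or x+3 in the set.
import Mathlib
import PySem

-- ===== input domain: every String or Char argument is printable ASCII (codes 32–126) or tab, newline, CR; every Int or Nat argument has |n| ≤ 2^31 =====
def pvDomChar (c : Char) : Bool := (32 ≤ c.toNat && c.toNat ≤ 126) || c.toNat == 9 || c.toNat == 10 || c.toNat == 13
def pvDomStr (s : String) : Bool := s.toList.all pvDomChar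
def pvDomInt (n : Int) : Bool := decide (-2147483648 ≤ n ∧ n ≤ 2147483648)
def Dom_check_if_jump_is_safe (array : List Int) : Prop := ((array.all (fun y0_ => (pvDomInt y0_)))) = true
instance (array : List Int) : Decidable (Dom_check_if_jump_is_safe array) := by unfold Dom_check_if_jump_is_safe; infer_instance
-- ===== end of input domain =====

-- B replaces A's sort-and-scan by a hash-set pass: distinctness via set size, and the
-- gap condition via "every non-maximal value has a successor within 3 in the set"
-- (objective: alternative — no sort at all).

-- ===== PORT A =====
-- the 'for num1, num2 in zip(...)' loop with its two early returns
def pvLoopA : List (Int × Int) → Bool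
  | [] => true
  | (n1, n2) :: rest =>
      if n1 - n2 > 3 then false
      else if n1 = n2 then false
      else pvLoopA rest

def check_if_jump_is_safe (array : List Int) : Bool :=
  let sorted_array := PySem.List.sorted array (fun x => x) true
  pvLoopA (sorted_array.zip (PySem.List.slice sorted_array (some 1) none))

-- ===== PORT B =====
def check_if_jump_is_safe_alt (array : List Int) : Bool :=
  if array = [] then true
  else
    let values := PySem.Set.ofList array
    if values.length ≠ array.length then false
    else
      match PySem.List.max? values (fun x => x) with
      | none => true
      | some top =>
          values.all (fun x =>
            if x = top then true
            else PySem.Set.contains values (x + 1) || PySem.Set.contains values (x + 2) ||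
                 PySem.Set.contains values (x + 3))

-- ===== PRECONDITION & SPEC =====
def Spec_check_if_jump_is_safe (array : List Int) (out : Bool) : Prop := out = check_if_jump_is_safe_alt array
instance (array : List Int) (out : Bool) : Decidable (Spec_check_if_jump_is_safe array out) := by unfold Spec_check_if_jump_is_safe; infer_instance

-- ===== CLAIM (what is proved, stated in full; the proofs are below) =====
def Claim_equal_check_if_jump_is_safe : Prop := ∀ (array : List Int), Dom_check_if_jump_is_safe array → Spec_check_if_jump_is_safe array (check_if_jump_is_safe array)

-- ===== LEMMAS AND PROOFS =====

-- A's early-return loop is the conjunction over all adjacent pairs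
theorem pvLoopA_eq_all (ps : List (Int × Int)) :
    pvLoopA ps = ps.all (fun p => decide (p.1 - p.2 ≤ 3) && decide (¬ p.1 = p.2)) := by
  induction ps with
  | nil => rfl
  | cons p rest ih =>
      obtain ⟨n1, n2⟩ := p
      simp only [pvLoopA, List.all_cons]
      split_ifs with h1 h2
      · simp; omega
      · simp [h2]
      · simp only [ih]
        have : (decide (n1 - n2 ≤ 3) && decide (¬ n1 = n2)) = true := by
          simp [h2]; omega
        rw [this, Bool.true_and]

-- all over zip-with-tail is IsChain
theorem pvZipTailChain (P : Int → Int → Bool) :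
    (l : List Int) → (((l.zip l.tail).all (fun p => P p.1 p.2) = true) ↔
      List.IsChain (fun a b => P a b = true) l)
  | [] => by simp
  | [a] => by simp
  | a :: b :: r => by
      simp only [List.tail_cons, List.zip_cons_cons, List.all_cons, Bool.and_eq_true,
        List.isChain_cons_cons]
      exact and_congr Iff.rfl (pvZipTailChain P (b :: r))

-- set(xs) keeps a subsequence of xs
theorem pvOfListSublist (xs : List Int) : List.Sublist (PySem.Set.ofList xs) xs := by
  induction xs using List.reverseRecOn with
  | nil => simp [PySem.Set.ofList_nil]
  | append_singleton ys x ih =>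
      rw [PySem.Set.ofList_append_singleton, PySem.Set.add_eq_ite]
      split
      · exact ih.trans (List.sublist_append_left ys [x])
      · exact List.Sublist.append ih (List.Sublist.refl [x])

theorem pvLenOfListIff (xs : List Int) :
    (PySem.Set.ofList xs).length = xs.length ↔ xs.Nodup := by
  constructor
  · intro h
    have := (pvOfListSublist xs).eq_of_length h
    rw [← this]
    exact PySem.Set.nodup_ofList xs
  · intro h
    rw [PySem.Set.ofList_eq_self_of_nodup xs h]

-- sorted descending is the reverse of sorted ascending (for value lists)
theorem pvDescEqRevAsc (array : List Int) :
    PySem.List.sorted array (fun x => x) true =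
      (PySem.List.sorted array (fun x => x) false).reverse := by
  have h := PySem.List.eq_of_perm_of_pairwise_le_of_injective (fun x : Int => x)
    (fun a b h => h)
    (l₁ := (PySem.List.sorted array (fun x => x) true).reverse)
    (l₂ := PySem.List.sorted array (fun x => x) false)
    (((PySem.List.sorted array (fun x => x) true).reverse_perm.trans
        (PySem.List.sorted_perm array (fun x => x) true)).trans
      (PySem.List.sorted_perm array (fun x => x) false).symm)
    (by simpa [List.pairwise_reverse] using
      PySem.List.sorted_pairwise_rev array (fun x => x))
    (PySem.List.sorted_pairwise array (fun x => x))
  rw [← h, List.reverse_reverse]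

-- on a weakly increasing list, "gap ≤ 3 and distinct at each step" = "nodup and gap ≤ 3"
theorem pvConjChain :
    (s : List Int) → s.Pairwise (· ≤ ·) →
      (List.IsChain (fun a b : Int => b - a ≤ 3 ∧ ¬ b = a) s ↔
        s.Nodup ∧ List.IsChain (fun a b : Int => b - a ≤ 3) s)
  | [] => by simp
  | [a] => by simp
  | a :: b :: r => by
      intro hp
      have hab : a ≤ b := (List.pairwise_cons.mp hp).1 b (by simp)
      have hbr : ∀ y ∈ r, b ≤ y := fun y hy =>
        (List.pairwise_cons.mp (List.pairwise_cons.mp hp).2).1 y hy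
      have ih := pvConjChain (b :: r) (List.pairwise_cons.mp hp).2
      rw [List.isChain_cons_cons, ih, List.isChain_cons_cons]
      constructor
      · rintro ⟨⟨hg, hne⟩, hnd, hc⟩
        refine ⟨List.nodup_cons.mpr ⟨?_, hnd⟩, hg, hc⟩
        intro hmem
        rcases List.mem_cons.mp hmem with rfl | har
        · exact hne rfl
        · have := hbr a har
          exact hne (by omega)
      · rintro ⟨hnd, hg, hc⟩
        have h1 := List.nodup_cons.mp hnd
        refine ⟨⟨hg, ?_⟩, h1.2, hc⟩
        intro hba
        exact h1.1 (List.mem_cons.mpr (Or.inl hba.symm))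

-- on a strictly increasing list, adjacent gaps ≤ 3 = every non-maximal element has a
-- successor at distance 1, 2 or 3
theorem pvChainGapIff :
    (s : List Int) → s.Pairwise (· < ·) →
      (List.IsChain (fun a b : Int => b - a ≤ 3) s ↔
        ∀ x ∈ s, (¬ ∀ y ∈ s, y ≤ x) → (x + 1 ∈ s ∨ x + 2 ∈ s ∨ x + 3 ∈ s))
  | [] => by simp
  | [a] => by simp
  | a :: b :: r => by
      intro hp
      have ha : ∀ y ∈ b :: r, a < y := (List.pairwise_cons.mp hp).1
      have hp' : (b :: r).Pairwise (· < ·) := (List.pairwise_cons.mp hp).2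
      have hb : ∀ y ∈ b :: r, b ≤ y := by
        intro y hy
        rcases List.mem_cons.mp hy with rfl | hy'
        · exact le_refl y
        · exact le_of_lt ((List.pairwise_cons.mp hp').1 y hy')
      have ih := pvChainGapIff (b :: r) hp'
      rw [List.isChain_cons_cons, ih]
      constructor
      · rintro ⟨hg, htail⟩ x hx hnx
        rcases List.mem_cons.mp hx with hxa | hx'
        · -- x = a : b witnesses the successor
          have hab : x < b := by have := ha b (by simp); omega
          have hcase : b = x + 1 ∨ b = x + 2 ∨ b = x + 3 := by omega
          rcases hcase with hc | hc | hc
          · exact Or.inl (by rw [← hc]; simp)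
          · exact Or.inr (Or.inl (by rw [← hc]; simp))
          · exact Or.inr (Or.inr (by rw [← hc]; simp))
        · -- x in the tail: use the tail statement, witnesses are never a
          have hnx' : ¬ ∀ y ∈ b :: r, y ≤ x := by
            intro hall
            exact hnx (by
              intro y hy
              rcases List.mem_cons.mp hy with rfl | hy'
              · exact le_of_lt (ha x hx')
              · exact hall y hy')
          rcases htail x hx' hnx' with h | h | h
          · exact Or.inl (List.mem_cons.mpr (Or.inr h))
          · exact Or.inr (Or.inl (List.mem_cons.mpr (Or.inr h)))
          · exact Or.inr (Or.inr (List.mem_cons.mpr (Or.inr h)))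
      · intro hall
        have hax : a < b := ha b (by simp)
        constructor
        · -- the gap a → b
          have hna : ¬ ∀ y ∈ a :: b :: r, y ≤ a := by
            intro hle
            exact absurd (hle b (by simp [List.mem_cons])) (by omega)
          rcases hall a (by simp) hna with h | h | h <;>
          · rcases List.mem_cons.mp h with he | h'
            · omega
            · have := hb _ h'; omega
        · -- the tail chain
          intro x hx hnx
          have hax2 : a < x := ha x hx
          have hnx2 : ¬ ∀ y ∈ a :: b :: r, y ≤ x := fun hle =>
            hnx (fun y hy => hle y (List.mem_cons.mpr (Or.inr hy)))
          rcases hall x (List.mem_cons.mpr (Or.inr hx)) hnx2 with h | h | h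
          · rcases List.mem_cons.mp h with he | h'
            · omega
            · exact Or.inl h'
          · rcases List.mem_cons.mp h with he | h'
            · omega
            · exact Or.inr (Or.inl h')
          · rcases List.mem_cons.mp h with he | h'
            · omega
            · exact Or.inr (Or.inr h')

-- characterisation of A
theorem pvA_iff (array : List Int) :
    (check_if_jump_is_safe array = true ↔
      ((PySem.List.sorted array (fun x => x) false).Nodup ∧
        List.IsChain (fun a b : Int => b - a ≤ 3)
          (PySem.List.sorted array (fun x => x) false))) := by
  have hps : (PySem.List.sorted array (fun x => x) false).Pairwise (· ≤ ·) :=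
    PySem.List.sorted_pairwise array (fun x => x)
  have h1 : check_if_jump_is_safe array =
      (((PySem.List.sorted array (fun x => x) false).reverse.zip
          (PySem.List.sorted array (fun x => x) false).reverse.tail).all
        (fun p => decide (p.1 - p.2 ≤ 3) && decide (¬ p.1 = p.2))) := by
    simp only [check_if_jump_is_safe, PySem.List.slice_from_one, pvDescEqRevAsc,
      pvLoopA_eq_all]
  rw [h1]
  refine (pvZipTailChain (fun n1 n2 => decide (n1 - n2 ≤ 3) && decide (¬ n1 = n2))
    (PySem.List.sorted array (fun x => x) false).reverse).trans
    (List.isChain_reverse.trans ?_)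
  have h2 : List.IsChain
      (fun a b : Int => (decide (b - a ≤ 3) && decide (¬ b = a)) = true)
      (PySem.List.sorted array (fun x => x) false) ↔
      List.IsChain (fun a b : Int => b - a ≤ 3 ∧ ¬ b = a)
        (PySem.List.sorted array (fun x => x) false) :=
    by
      constructor <;> (intro h; refine h.imp ?_; intros) <;> simp_all
  exact h2.trans (pvConjChain _ hps)

-- characterisation of B
theorem pvB_iff (array : List Int) (h : array ≠ []) :
    (check_if_jump_is_safe_alt array = true ↔
      (array.Nodup ∧ ∀ x ∈ array, (¬ ∀ y ∈ array, y ≤ x) →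
        (x + 1 ∈ array ∨ x + 2 ∈ array ∨ x + 3 ∈ array))) := by
  by_cases hnd : array.Nodup
  · have hofl : PySem.Set.ofList array = array :=
      PySem.Set.ofList_eq_self_of_nodup array hnd
    simp only [check_if_jump_is_safe_alt, if_neg h, hofl]
    rw [if_neg (fun hc => hc rfl)]
    obtain ⟨a0, rest, rfl⟩ := List.exists_cons_of_ne_nil h
    cases hm : PySem.List.max? (a0 :: rest) (fun x : Int => x) with
    | none => simp [PySem.List.max?_id_cons] at hm
    | some top =>
        have htopmem : top ∈ a0 :: rest := PySem.List.max?_mem hm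
        have htopmax : ∀ y ∈ a0 :: rest, y ≤ top := PySem.List.max?_isMax hm
        simp only [List.all_eq_true, hnd, true_and]
        refine forall_congr' fun x => ?_
        refine imp_congr_right fun hx => ?_
        by_cases hxt : x = top
        · simp only [if_pos hxt]
          constructor
          · intro _ hno
            exact absurd (fun y hy => by rw [hxt]; exact htopmax y hy) hno
          · intro _; trivial
        · have hhyp : ¬ ∀ y ∈ a0 :: rest, y ≤ x := fun hall =>
            hxt (le_antisymm (htopmax x hx) (hall top htopmem))
          simp only [if_neg hxt, Bool.or_eq_true, PySem.Set.contains_iff]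
          constructor
          · intro hmem _; exact or_assoc.mp hmem
          · intro himp; exact or_assoc.mpr (himp hhyp)
  · have hlen : (PySem.Set.ofList array).length ≠ array.length := fun he =>
      hnd ((pvLenOfListIff array).mp he)
    simp only [check_if_jump_is_safe_alt, if_neg h]
    rw [if_pos hlen]
    simp only [Bool.false_eq_true, false_iff]
    exact fun hc => hnd hc.1

-- ===== VERDICT (by name: the statement is the Claim_ definition above) =====
theorem check_if_jump_is_safe_spec : Claim_equal_check_if_jump_is_safe := by
  intro array _hdom
  unfold Spec_check_if_jump_is_safe
  by_cases he : array = []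
  · subst he; decide
  · have hperm : (PySem.List.sorted array (fun x => x) false).Perm array :=
      PySem.List.sorted_perm array (fun x => x) false
    have hps : (PySem.List.sorted array (fun x => x) false).Pairwise (· ≤ ·) :=
      PySem.List.sorted_pairwise array (fun x => x)
    rw [Bool.eq_iff_iff, pvA_iff, pvB_iff array he]
    constructor
    · rintro ⟨hnds, hchain⟩
      have hlt : (PySem.List.sorted array (fun x => x) false).Pairwise (· < ·) :=
        (hps.and hnds).imp (fun hab => lt_of_le_of_ne hab.1 hab.2)
      refine ⟨hperm.nodup_iff.mp hnds, ?_⟩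
      have hk := (pvChainGapIff _ hlt).mp hchain
      simpa only [hperm.mem_iff] using hk
    · rintro ⟨hnda, hcond⟩
      have hnds : (PySem.List.sorted array (fun x => x) false).Nodup :=
        hperm.nodup_iff.mpr hnda
      have hlt : (PySem.List.sorted array (fun x => x) false).Pairwise (· < ·) :=
        (hps.and hnds).imp (fun hab => lt_of_le_of_ne hab.1 hab.2)
      refine ⟨hnds, (pvChainGapIff _ hlt).mpr ?_⟩
      simpa only [hperm.mem_iff] using hcond
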